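-- pv_equiv track=rewrite | github.com/srswart/mserfurt | scribesim/annotate/ledger.py | _build_canvas_to_manuscript
-- ===== SOURCE A (Python) =====
-- from typing import Any
--
-- def _sanitize_fragment(label: str) -> str:
--     safe = "".join(ch if ch.isalnum() else "_" for ch in str(label))
--     while "__" in safe:
--         safe = safe.replace("__", "_")
--     return safe.strip("_") or "item"
--
-- def _build_canvas_to_manuscript(selection_manifest: dict[str, Any]) -> dict[str, str]:
--     mapping: dict[str, str] = {}
--     ambiguous: set[str] = set()
--     for folio in selection_manifest.get("folios", []):
--         slug = _sanitize_fragment(str(folio.get("canvas_label", "")))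
--         manuscript = str(folio.get("source_manuscript_label", "unknown"))
--         if slug in mapping and mapping[slug] != manuscript:
--             ambiguous.add(slug)
--         else:
--             mapping[slug] = manuscript
--     for slug in ambiguous:
--         mapping[slug] = f"ambiguous:{slug}"
--     return mapping
-- ===== SOURCE B (Python) =====
-- def _build_canvas_to_manuscript(selection_manifest):
--     # Group the distinct manuscript labels per slug in one pass; the slug is
--     # built directly by joining maximal alphanumeric runs with "_" (no
--     # replace/strip post-processing).
--     groups: dict[str, list[str]] = {}
--     for folio in selection_manifest.get("folios", []):
--         label = str(folio.get("canvas_label", ""))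
--         runs, cur = [], []
--         for ch in label:
--             if ch.isalnum():
--                 cur.append(ch)
--             else:
--                 if cur:
--                     runs.append("".join(cur))
--                 cur = []
--         if cur:
--             runs.append("".join(cur))
--         slug = "_".join(runs) or "item"
--         manuscript = str(folio.get("source_manuscript_label", "unknown"))
--         vals = groups.setdefault(slug, [])
--         if manuscript not in vals:
--             vals.append(manuscript)
--     return {s: v[0] if len(v) == 1 else f"ambiguous:{s}" for s, v in groups.items()}
-- ===== Notes on version B (the rewrite author's own statement) =====
-- stated objective: alternative
-- what changed: B replaces A's sanitize pipeline (map non-alnum to '_', repeatedly replace '__' until fixpoint, strip '_') with a single scan joining maximal alphanumeric runs with '_', and replaces A's first-value mapping plus conflict set patched afterwards with one dict grouping the distinct manuscript labels per slug followed by a single output pass.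
import Mathlib
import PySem

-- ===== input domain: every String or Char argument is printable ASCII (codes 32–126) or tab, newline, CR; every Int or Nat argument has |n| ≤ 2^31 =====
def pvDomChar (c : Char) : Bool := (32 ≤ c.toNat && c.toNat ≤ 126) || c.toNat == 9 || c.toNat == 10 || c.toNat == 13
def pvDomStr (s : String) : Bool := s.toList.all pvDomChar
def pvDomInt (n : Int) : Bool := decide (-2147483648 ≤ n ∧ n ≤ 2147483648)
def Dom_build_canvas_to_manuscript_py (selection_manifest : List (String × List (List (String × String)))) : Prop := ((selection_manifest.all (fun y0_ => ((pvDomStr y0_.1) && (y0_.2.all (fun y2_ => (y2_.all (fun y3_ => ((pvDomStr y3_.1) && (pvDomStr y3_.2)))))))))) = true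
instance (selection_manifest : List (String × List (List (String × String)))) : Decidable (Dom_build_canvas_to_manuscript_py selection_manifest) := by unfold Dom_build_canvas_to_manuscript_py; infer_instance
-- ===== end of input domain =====

-- B builds each slug in one scan (maximal alphanumeric runs joined by "_") instead of
-- A's map/replace-until-fixpoint/strip pipeline, and groups the distinct manuscript
-- labels per slug in one dict with a single output pass instead of A's first-value
-- mapping plus conflict set patched afterwards; objective: alternative.

-- Length bound for replace.go with old = "__", new = "_": needed by the port's
-- termination proof (the Python `while "__" in safe` loop), so it stays above the port.
theorem pvGoLenLe (fuel : Nat) : ∀ (l acc : List Char),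
    (PySem.Chars.replace.go ['_','_'] ['_'] fuel l acc).length ≤ acc.length + l.length := by
  induction fuel with
  | zero => intro l acc; rw [PySem.Chars.replace.go.eq_def]; simp [Nat.add_comm]
  | succ n ih =>
    intro l acc
    rw [PySem.Chars.replace.go.eq_def]
    match l with
    | [] => simp
    | c :: t =>
      by_cases h : List.isPrefixOf ['_','_'] (c :: t)
      · simp only [h, if_true]
        have h2 : 2 ≤ (c :: t).length := by
          have := List.IsPrefix.length_le (List.isPrefixOf_iff_prefix.mp h); simpa using this
        have := ih (List.drop (['_','_'] : List Char).length (c :: t)) (['_'].reverse ++ acc)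
        simp at this ⊢
        omega
      · simp only [h]
        have := ih t (c :: acc)
        simp at this ⊢
        omega

theorem pvGoLenLt (fuel : Nat) : ∀ (l acc : List Char), l.length ≤ fuel →
    (['_','_'] : List Char) <:+: l →
    (PySem.Chars.replace.go ['_','_'] ['_'] fuel l acc).length < acc.length + l.length := by
  induction fuel with
  | zero =>
    intro l acc hlen hinf
    have := hinf.length_le; simp at this; omega
  | succ n ih =>
    intro l acc hlen hinf
    rw [PySem.Chars.replace.go.eq_def]
    match l with
    | [] => have := hinf.length_le; simp at this
    | c :: t =>
      by_cases h : List.isPrefixOf ['_','_'] (c :: t)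
      · simp only [h, if_true]
        have h2 : 2 ≤ (c :: t).length := by
          have := List.IsPrefix.length_le (List.isPrefixOf_iff_prefix.mp h); simpa using this
        have hb := pvGoLenLe n (List.drop (['_','_'] : List Char).length (c :: t)) (['_'].reverse ++ acc)
        have hdl : (List.drop (['_','_'] : List Char).length (c :: t)).length = (c :: t).length - 2 := by
          simp
        have hal : ((['_'] : List Char).reverse ++ acc).length = acc.length + 1 := by simp
        rw [hdl, hal] at hb
        omega
      · simp only [h]
        have hinf' : (['_','_'] : List Char) <:+: t := by
          rcases List.infix_cons_iff.mp hinf with hp | hi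
          · exact absurd (List.isPrefixOf_iff_prefix.mpr hp) h
          · exact hi
        have := ih t (c :: acc) (by simpa using Nat.lt_succ_iff.mp (by simpa using hlen)) hinf'
        simp at this ⊢
        omega

theorem pvReplaceLenLt (s : List Char) (h : PySem.Chars.isIn ['_','_'] s = true) :
    (PySem.Chars.replace s ['_','_'] ['_']).length < s.length := by
  have hinf := (PySem.Chars.isIn_iff_infix _ _).mp h
  unfold PySem.Chars.replace
  simp only [List.isEmpty_cons]
  have := pvGoLenLt s.length s [] (le_refl _) hinf
  simpa using this

-- ===== PORT A =====
-- the `while "__" in safe: safe = safe.replace("__", "_")` loop of _sanitize_fragment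
def pvCollapse (s : List Char) : List Char :=
  if h : PySem.Chars.isIn ['_','_'] s then
    pvCollapse (PySem.Chars.replace s ['_','_'] ['_'])
  else s
termination_by s.length
decreasing_by exact pvReplaceLenLt s h

-- A's _sanitize_fragment: map non-alnum to '_', collapse "__", strip '_', fallback "item"
def sanitizeFragment (label : String) : String :=
  let safe := label.toList.map (fun ch => if PySem.Chars.isalnum ch then ch else '_')
  let safe := pvCollapse safe
  let r := PySem.Chars.stripChars safe ['_']
  if r.isEmpty then "item" else String.ofList r

-- slug / manuscript of one folio (A's expressions)
def pvSlug (folio : List (String × String)) : String :=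
  sanitizeFragment ((PySem.Dict.mk folio).getD "canvas_label" "")

def pvMan (folio : List (String × String)) : String :=
  (PySem.Dict.mk folio).getD "source_manuscript_label" "unknown"

-- A's loop body: first-value mapping + conflict set
def stepA (st : PySem.Dict String String × PySem.Set String)
    (folio : List (String × String)) : PySem.Dict String String × PySem.Set String :=
  match st.1.get? (pvSlug folio) with
  | some v => if v ≠ pvMan folio then (st.1, PySem.Set.add st.2 (pvSlug folio))
              else (st.1.insert (pvSlug folio) (pvMan folio), st.2)
  | none => (st.1.insert (pvSlug folio) (pvMan folio), st.2)

def build_canvas_to_manuscript_py (selection_manifest : List (String × List (List (String × String)))) : List (String × String) :=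
  let folios := (PySem.Dict.mk selection_manifest).getD "folios" []
  let st := folios.foldl stepA (PySem.Dict.empty, PySem.Set.empty)
  -- `for slug in ambiguous: mapping[slug] = f"ambiguous:{slug}"` — overwrites in place,
  -- value depends only on the key, so the result is independent of set iteration order
  (st.2.foldl (fun m slug => m.insert slug ("ambiguous:" ++ slug)) st.1).items

-- ===== PORT B =====
-- Source B's inner character loop: `runs, cur = [], []; for ch in label: …`
def pvSlugStep (st : List (List Char) × List Char) (ch : Char) : List (List Char) × List Char :=
  if PySem.Chars.isalnum ch then (st.1, st.2 ++ [ch])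
  else if st.2.isEmpty then (st.1, []) else (st.1 ++ [st.2], [])

-- Source B's slug: maximal alphanumeric runs joined with "_", or "item" when there are none
def pvSlugB (label : String) : String :=
  let st := label.toList.foldl pvSlugStep ([], [])
  let runs := if st.2.isEmpty then st.1 else st.1 ++ [st.2]
  if runs.isEmpty then "item" else String.ofList (PySem.Chars.join ['_'] runs)

def pvSlugOfB (folio : List (String × String)) : String :=
  pvSlugB ((PySem.Dict.mk folio).getD "canvas_label" "")

def pvManB (folio : List (String × String)) : String :=
  (PySem.Dict.mk folio).getD "source_manuscript_label" "unknown"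

-- Source B's loop body: `vals = groups.setdefault(slug, []); if manuscript not in vals: vals.append(manuscript)`
def stepB (g : PySem.Dict String (List String))
    (folio : List (String × String)) : PySem.Dict String (List String) :=
  g.modify (pvSlugOfB folio) []
    (fun vals => if pvManB folio ∈ vals then vals else vals ++ [pvManB folio])

def build_canvas_to_manuscript_py_alt (selection_manifest : List (String × List (List (String × String)))) : List (String × String) :=
  let folios := (PySem.Dict.mk selection_manifest).getD "folios" []
  let groups := folios.foldl stepB PySem.Dict.empty
  groups.items.map (fun p =>
    (p.1, if p.2.length == 1 then p.2.headD "" else "ambiguous:" ++ p.1))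

-- ===== PRECONDITION & SPEC =====
def Spec_build_canvas_to_manuscript_py (selection_manifest : List (String × List (List (String × String)))) (out : List (String × String)) : Prop := out = build_canvas_to_manuscript_py_alt selection_manifest
instance (selection_manifest : List (String × List (List (String × String)))) (out : List (String × String)) : Decidable (Spec_build_canvas_to_manuscript_py selection_manifest out) := by unfold Spec_build_canvas_to_manuscript_py; infer_instance

-- ===== CLAIM (what is proved, stated in full; the proofs are below) =====
def Claim_equal_build_canvas_to_manuscript_py : Prop := ∀ (selection_manifest : List (String × List (List (String × String)))), Dom_build_canvas_to_manuscript_py selection_manifest → Spec_build_canvas_to_manuscript_py selection_manifest (build_canvas_to_manuscript_py selection_manifest)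

-- ===== LEMMAS AND PROOFS =====

-- ---- the slug normal form: blocks of non-'_' characters, scanned with a carry ----
def pvFin (cur : List Char) : List (List Char) := if cur.isEmpty then [] else [cur]

def pvBk (cur : List Char) : List Char → List (List Char)
  | [] => pvFin cur
  | c :: t => if c = '_' then pvFin cur ++ pvBk [] t else pvBk (cur ++ [c]) t

-- replace-all of "__" by "_" as a clean recursion
def pvRall : List Char → List Char
  | [] => []
  | c :: t =>
    if (['_','_'] : List Char).isPrefixOf (c :: t) then '_' :: pvRall (t.drop 1)
    else c :: pvRall t
termination_by l => l.length
decreasing_by all_goals (simp only [List.length_cons, List.length_drop]; omega)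

theorem pvGo_eq_rall (fuel : Nat) : ∀ (l acc : List Char), l.length ≤ fuel →
    PySem.Chars.replace.go ['_','_'] ['_'] fuel l acc = acc.reverse ++ pvRall l := by
  induction fuel with
  | zero =>
    intro l acc hl
    have hnil : l = [] := List.length_eq_zero_iff.mp (Nat.le_zero.mp hl)
    subst hnil
    simp [PySem.Chars.replace.go.eq_def, pvRall]
  | succ n ih =>
    intro l acc hl
    rw [PySem.Chars.replace.go.eq_def]
    match l with
    | [] => simp [pvRall]
    | c :: t =>
      by_cases h : List.isPrefixOf ['_','_'] (c :: t)
      · simp only [h, if_true]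
        have hdrop : List.drop (['_','_'] : List Char).length (c :: t) = t.drop 1 := by simp
        have hlen : (t.drop 1).length ≤ n := by
          simp at hl ⊢; omega
        rw [hdrop, ih _ _ hlen]
        rw [pvRall, if_pos h]
        simp
      · simp only [h]
        have hlen : t.length ≤ n := by simp at hl; omega
        rw [ih _ _ hlen, pvRall, if_neg h]
        simp

theorem pvReplace_eq_rall (s : List Char) :
    PySem.Chars.replace s ['_','_'] ['_'] = pvRall s := by
  unfold PySem.Chars.replace
  simp only [List.isEmpty_cons]
  simpa using pvGo_eq_rall s.length s [] (le_refl _)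

-- collapsing "__" does not change the block structure
theorem pvBk_rall : ∀ (s : List Char) (cur : List Char), pvBk cur (pvRall s) = pvBk cur s
  | [], cur => by rw [pvRall]
  | c :: t, cur => by
    rw [pvRall]
    by_cases h : (['_','_'] : List Char).isPrefixOf (c :: t)
    · rw [if_pos h]
      obtain ⟨u, hu⟩ := List.isPrefixOf_iff_prefix.mp h
      simp only [List.cons_append, List.nil_append, List.cons.injEq] at hu
      obtain ⟨hc1, ht2⟩ := hu
      rw [← hc1, ← ht2]
      simp only [List.drop_succ_cons, List.drop_zero]
      rw [pvBk, if_pos rfl, pvBk_rall u []]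
      rw [show pvBk cur ('_' :: '_' :: u) = pvFin cur ++ pvBk [] ('_' :: u) from by
            rw [pvBk, if_pos rfl],
          show pvBk ([] : List Char) ('_' :: u) = pvFin [] ++ pvBk [] u from by
            rw [pvBk, if_pos rfl]]
      simp [pvFin]
    · rw [if_neg h]
      by_cases hc : c = '_'
      · subst hc
        rw [pvBk, if_pos rfl, pvBk, if_pos rfl, pvBk_rall t []]
      · rw [pvBk, if_neg hc, pvBk, if_neg hc, pvBk_rall t (cur ++ [c])]
termination_by s _ => s.length
decreasing_by
  · rw [← ht2]; simp only [List.length_cons]; omega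
  · simp only [List.length_cons]; omega
  · simp only [List.length_cons]; omega

theorem pvBk_collapse (s : List Char) : pvBk [] (pvCollapse s) = pvBk [] s := by
  rw [pvCollapse]
  by_cases h : PySem.Chars.isIn ['_','_'] s = true
  · rw [dif_pos h, pvBk_collapse (PySem.Chars.replace s ['_','_'] ['_']),
        pvReplace_eq_rall, pvBk_rall]
  · rw [dif_neg h]
termination_by s.length
decreasing_by exact pvReplaceLenLt s h

theorem pvCollapse_noDD (s : List Char) :
    PySem.Chars.isIn ['_','_'] (pvCollapse s) = false := by
  rw [pvCollapse]
  by_cases h : PySem.Chars.isIn ['_','_'] s = true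
  · rw [dif_pos h]
    exact pvCollapse_noDD (PySem.Chars.replace s ['_','_'] ['_'])
  · rw [dif_neg h]
    exact Bool.not_eq_true _ ▸ (by simpa using h)
termination_by s.length
decreasing_by exact pvReplaceLenLt s h

-- small facts about pvBk
theorem pvDropWhile_all_false (p : Char → Bool) : ∀ (l : List Char),
    (∀ x ∈ l, p x = false) → l.dropWhile p = l := by
  intro l h
  induction l with
  | nil => rfl
  | cons a t ih => simp [List.dropWhile, h a (by simp)]

theorem pvBk_all (l : List Char) : ∀ (cur : List Char), (∀ x ∈ l, x ≠ '_') →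
    pvBk cur l = pvFin (cur ++ l) := by
  induction l with
  | nil => intro cur _; simp [pvBk]
  | cons c t ih =>
    intro cur h
    rw [pvBk, if_neg (h c (by simp)), ih (cur ++ [c]) (fun x hx => h x (by simp [hx]))]
    simp

theorem pvBk_block (a : List Char) : ∀ (cur u : List Char), (∀ x ∈ a, x ≠ '_') →
    pvBk cur (a ++ '_' :: u) = pvFin (cur ++ a) ++ pvBk [] u := by
  induction a with
  | nil => intro cur u _; simp [pvBk]
  | cons x a' ih =>
    intro cur u h
    rw [List.cons_append, pvBk, if_neg (h x (by simp)),
        ih (cur ++ [x]) u (fun y hy => h y (by simp [hy]))]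
    simp


theorem pvBk_ne_nil (l : List Char) : ∀ (cur : List Char), cur ≠ [] → pvBk cur l ≠ [] := by
  induction l with
  | nil => intro cur h; simp [pvBk, pvFin, h]
  | cons c t ih =>
    intro cur h
    rw [pvBk]
    by_cases hc : c = '_'
    · rw [if_pos hc]; simp [pvFin, h]
    · rw [if_neg hc]; exact ih (cur ++ [c]) (by simp)

theorem pvBk_blocks_ne (l : List Char) : ∀ (cur b : List Char), b ∈ pvBk cur l → b ≠ [] := by
  induction l with
  | nil =>
    intro cur b hb
    by_cases h : cur.isEmpty
    · simp [pvBk, pvFin, h] at hb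
    · simp [pvBk, pvFin, h] at hb
      subst hb
      simpa using h
  | cons c t ih =>
    intro cur b hb
    rw [pvBk] at hb
    by_cases hc : c = '_'
    · rw [if_pos hc] at hb
      rcases List.mem_append.mp hb with h1 | h2
      · by_cases h : cur.isEmpty
        · simp [pvFin, h] at h1
        · simp [pvFin, h] at h1
          subst h1
          simpa using h
      · exact ih [] b h2
    · rw [if_neg hc] at hb
      exact ih (cur ++ [c]) b hb

theorem pvJoin_ne_nil (bs : List (List Char)) (h : bs ≠ [])
    (hb : ∀ b ∈ bs, b ≠ []) : PySem.Chars.join ['_'] bs ≠ [] := by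
  match bs with
  | [] => exact absurd rfl h
  | [b] =>
    rw [PySem.Chars.join_singleton]
    exact hb b (by simp)
  | b :: b2 :: rest =>
    rw [PySem.Chars.join_cons_cons]
    intro hcon
    simp at hcon

-- head of a dropWhile result fails the predicate
theorem pvDropWhile_head (p : Char → Bool) : ∀ (l : List Char) (r0 : Char) (u : List Char),
    l.dropWhile p = r0 :: u → p r0 = false := by
  intro l
  induction l with
  | nil => intro r0 u h; simp at h
  | cons a t ih =>
    intro r0 u h
    rw [List.dropWhile_cons] at h
    by_cases ha : p a
    · rw [if_pos ha] at h; exact ih r0 u h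
    · rw [if_neg ha] at h
      injection h with h1 _
      rw [← h1]
      simpa using ha

-- no-"__" strings: stripping '_' ends equals joining the blocks with single '_'
theorem pvStrip_eq_join : ∀ (s : List Char), ¬ (['_','_'] : List Char) <:+: s →
    PySem.Chars.stripChars s ['_'] = PySem.Chars.join ['_'] (pvBk [] s)
  | [], _ => rfl
  | c :: t, h => by
    by_cases hc : c = '_'
    · subst hc
      have ht : ¬ (['_','_'] : List Char) <:+: t :=
        fun hi => h (hi.trans (List.suffix_cons '_' t).isInfix)
      have hstep : PySem.Chars.stripChars ('_' :: t) ['_'] = PySem.Chars.stripChars t ['_'] := by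
        simp only [PySem.Chars.stripChars]
        simp [List.contains_eq_mem]
      rw [hstep, pvStrip_eq_join t ht, pvBk, if_pos rfl]
      simp [pvFin]
    · have hsplit : t.takeWhile (fun x => x ≠ '_') ++ t.dropWhile (fun x => x ≠ '_') = t :=
        List.takeWhile_append_dropWhile
      have hamem : ∀ y ∈ t.takeWhile (fun x => x ≠ '_'), y ≠ '_' := by
        intro y hy
        have hp := List.mem_takeWhile_imp hy
        exact of_decide_eq_true hp
      rcases hre : t.dropWhile (fun x => x ≠ '_') with _ | ⟨r0, u⟩
      · -- no '_' anywhere in the string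
        have hta : t.takeWhile (fun x => x ≠ '_') = t := by
          conv_rhs => rw [← hsplit]
          rw [hre, List.append_nil]
        have hall : ∀ x ∈ c :: t, x ≠ '_' := by
          intro x hx
          rcases List.mem_cons.mp hx with rfl | hx'
          · exact hc
          · rw [← hta] at hx'
            exact hamem x hx'
        have hallb : ∀ x ∈ c :: t, ((['_'] : List Char).contains x) = false := by
          intro x hx
          simp only [List.contains_eq_mem]
          simp [hall x hx]
        have hstrip : PySem.Chars.stripChars (c :: t) ['_'] = c :: t := by
          simp only [PySem.Chars.stripChars]
          rw [pvDropWhile_all_false _ _ hallb]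
          rw [pvDropWhile_all_false _ _ (fun x hx => hallb x (List.mem_reverse.mp hx))]
          simp
        rw [hstrip, pvBk_all _ [] hall]
        simp [pvFin, PySem.Chars.join_singleton]
      · have hr0 : r0 = '_' := by
          have := pvDropWhile_head _ t r0 u hre
          simpa using this
        subst hr0
        have htu : t = t.takeWhile (fun x => x ≠ '_') ++ '_' :: u := by
          conv_lhs => rw [← hsplit]
          rw [hre]
        set a := t.takeWhile (fun x => x ≠ '_') with ha
        rcases hu : u with _ | ⟨d, u'⟩
        · -- exactly one trailing '_'
          have hall : ∀ x ∈ c :: a, x ≠ '_' := by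
            intro x hx
            rcases List.mem_cons.mp hx with rfl | hx'
            · exact hc
            · exact hamem x hx'
          have hallb : ∀ x ∈ c :: a, ((['_'] : List Char).contains x) = false := by
            intro x hx
            simp only [List.contains_eq_mem]
            simp [hall x hx]
          have hshape : c :: t = (c :: a) ++ ['_'] := by
            rw [htu, hu]; simp
          have hstrip : PySem.Chars.stripChars (c :: t) ['_'] = c :: a := by
            simp only [PySem.Chars.stripChars]
            rw [hshape]
            have h1 : List.dropWhile (fun c => (['_'] : List Char).contains c) ((c :: a) ++ ['_'])
                = (c :: a) ++ ['_'] := by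
              rw [List.cons_append, List.dropWhile_cons, if_neg (by simp [List.contains_eq_mem, hc])]
            rw [h1, List.reverse_append]
            have h2 : List.dropWhile (fun c => (['_'] : List Char).contains c)
                (['_'].reverse ++ (c :: a).reverse) = (c :: a).reverse := by
              rw [List.reverse_singleton, List.singleton_append, List.dropWhile_cons,
                  if_pos (by simp [List.contains_eq_mem])]
              exact pvDropWhile_all_false _ _ (fun x hx => hallb x (List.mem_reverse.mp hx))
            rw [h2, List.reverse_reverse]
          have hbk : pvBk [] (c :: t) = [c :: a] := by
            rw [pvBk, if_neg hc]
            simp only [List.nil_append]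
            rw [htu, hu, pvBk_block a [c] [] hamem]
            simp [pvBk, pvFin]
          rw [hstrip, hbk, PySem.Chars.join_singleton]
        · -- an interior '_' separating the first block from the rest
          have hd : d ≠ '_' := by
            intro hdeq
            subst hdeq
            apply h
            refine List.infix_cons_iff.mpr (Or.inr ?_)
            rw [htu, hu]
            exact ⟨a, u', by simp⟩
          have hru : ¬ (['_','_'] : List Char) <:+: (d :: u') := by
            intro hi
            apply h
            refine List.infix_cons_iff.mpr (Or.inr ?_)
            rw [htu, hu]
            exact hi.trans ⟨a ++ ['_'], [], by simp⟩
          have hih := pvStrip_eq_join (d :: u') hru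
          have hallb : ∀ x ∈ c :: a, ((['_'] : List Char).contains x) = false := by
            intro x hx
            simp only [List.contains_eq_mem]
            rcases List.mem_cons.mp hx with rfl | hx'
            · simp [hc]
            · simp [hamem x hx']
          have hshape : c :: t = (c :: a) ++ '_' :: d :: u' := by rw [htu, hu]; simp
          have hdw : List.dropWhile (fun c => (['_'] : List Char).contains c) (d :: u').reverse ≠ [] := by
            rw [Ne, List.dropWhile_eq_nil_iff]
            intro hcon
            have := hcon d (by simp)
            simp [List.contains_eq_mem, hd] at this
          have hstrip : PySem.Chars.stripChars (c :: t) ['_']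
              = (c :: a) ++ '_' :: PySem.Chars.stripChars (d :: u') ['_'] := by
            simp only [PySem.Chars.stripChars]
            rw [hshape]
            have h1 : List.dropWhile (fun c => (['_'] : List Char).contains c)
                ((c :: a) ++ '_' :: d :: u') = (c :: a) ++ '_' :: d :: u' := by
              rw [List.cons_append, List.dropWhile_cons, if_neg (by simp [List.contains_eq_mem, hc])]
            rw [h1, List.reverse_append, List.dropWhile_append]
            have h3 : ('_' :: d :: u').reverse = (d :: u').reverse ++ ['_'] := by simp
            have h4 : List.dropWhile (fun c => (['_'] : List Char).contains c)
                (('_' :: d :: u').reverse) =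
                List.dropWhile (fun c => (['_'] : List Char).contains c) (d :: u').reverse ++ ['_'] := by
              rw [h3, List.dropWhile_append,
                  if_neg (by simpa [List.isEmpty_iff] using hdw)]
            have h5 : List.dropWhile (fun c => (['_'] : List Char).contains c) (d :: u') = d :: u' := by
              rw [List.dropWhile_cons, if_neg (by simp [List.contains_eq_mem, hd])]
            rw [h4, if_neg (by simp [List.isEmpty_iff]), h5]
            simp
          have hbk : pvBk [] (c :: t) = (c :: a) :: pvBk [] (d :: u') := by
            rw [pvBk, if_neg hc]
            simp only [List.nil_append]
            rw [htu, hu, pvBk_block a [c] (d :: u') hamem]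
            simp [pvFin]
          rw [hstrip, hih, hbk]
          have hne : pvBk [] (d :: u') ≠ [] := by
            rw [pvBk, if_neg hd]
            exact pvBk_ne_nil u' [d] (by simp)
          rcases hbks : pvBk [] (d :: u') with _ | ⟨b2, rest⟩
          · exact absurd hbks hne
          · rw [PySem.Chars.join_cons_cons]
            simp
termination_by s _ => s.length
decreasing_by
  all_goals first
    | (simp only [List.length_cons]; omega)
    | (have h6 := congrArg List.length htu
       rw [hu] at h6
       simp only [List.length_append, List.length_cons] at h6
       simp only [List.length_cons]
       omega)

-- ---- B's scan equals the block scan of the mapped string ----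
def pvBw (cur : List Char) : List Char → List (List Char)
  | [] => pvFin cur
  | c :: t => if PySem.Chars.isalnum c then pvBw (cur ++ [c]) t else pvFin cur ++ pvBw [] t

theorem pvFold_eq_bw (l : List Char) : ∀ (rs : List (List Char)) (cur : List Char),
    (l.foldl pvSlugStep (rs, cur)).1 ++ pvFin (l.foldl pvSlugStep (rs, cur)).2
      = rs ++ pvBw cur l := by
  induction l with
  | nil => intro rs cur; rfl
  | cons c t ih =>
    intro rs cur
    rw [List.foldl_cons, pvBw]
    by_cases hc : PySem.Chars.isalnum c
    · rw [if_pos hc]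
      have : pvSlugStep (rs, cur) c = (rs, cur ++ [c]) := by
        simp [pvSlugStep, hc]
      rw [this, ih]
    · rw [if_neg hc]
      have : pvSlugStep (rs, cur) c = (rs ++ pvFin cur, []) := by
        by_cases he : cur.isEmpty
        · simp [pvSlugStep, hc, he, pvFin]
        · simp [pvSlugStep, hc, he, pvFin]
      rw [this, ih]
      simp

theorem pvAlnum_ne_underscore (c : Char) (h : PySem.Chars.isalnum c = true) : c ≠ '_' := by
  intro hc
  subst hc
  exact absurd h (by decide)

theorem pvBw_eq_bk (l : List Char) : ∀ (cur : List Char),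
    pvBw cur l = pvBk cur (l.map (fun ch => if PySem.Chars.isalnum ch then ch else '_')) := by
  induction l with
  | nil => intro cur; rfl
  | cons c t ih =>
    intro cur
    rw [pvBw, List.map_cons]
    by_cases hc : PySem.Chars.isalnum c
    · rw [if_pos hc]
      rw [show (if PySem.Chars.isalnum c then c else '_') = c from if_pos hc]
      rw [pvBk, if_neg (pvAlnum_ne_underscore c hc), ih]
    · rw [if_neg hc]
      rw [show (if PySem.Chars.isalnum c then c else '_') = '_' from if_neg hc]
      rw [pvBk, if_pos rfl, ih]

-- the two slug computations agree
theorem pvSlug_eq_sanitize (label : String) : pvSlugB label = sanitizeFragment label := by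
  have hruns : (if (label.toList.foldl pvSlugStep ([], [])).2.isEmpty
      then (label.toList.foldl pvSlugStep ([], [])).1
      else (label.toList.foldl pvSlugStep ([], [])).1 ++ [(label.toList.foldl pvSlugStep ([], [])).2])
      = pvBk [] (label.toList.map (fun ch => if PySem.Chars.isalnum ch then ch else '_')) := by
    rw [← pvBw_eq_bk]
    have h1 := pvFold_eq_bw label.toList [] []
    simp only [List.nil_append] at h1
    rw [← h1]
    by_cases he : (label.toList.foldl pvSlugStep ([], [])).2.isEmpty
    · simp [pvFin, he]
    · simp [pvFin, he]
  have hstrip : PySem.Chars.stripChars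
        (pvCollapse (label.toList.map (fun ch => if PySem.Chars.isalnum ch then ch else '_'))) ['_']
      = PySem.Chars.join ['_']
        (pvBk [] (label.toList.map (fun ch => if PySem.Chars.isalnum ch then ch else '_'))) := by
    rw [pvStrip_eq_join _
        ((PySem.Chars.isIn_eq_false_iff _ _).mp (pvCollapse_noDD _)), pvBk_collapse]
  simp only [pvSlugB, sanitizeFragment, hruns, hstrip]
  by_cases hb : pvBk [] (label.toList.map (fun ch => if PySem.Chars.isalnum ch then ch else '_')) = []
  · rw [hb]
    simp [PySem.Chars.join]
    intro hcon
    exact absurd (by decide) hcon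
  · rw [if_neg (by simpa using hb)]
    have hjoin : PySem.Chars.join ['_']
        (pvBk [] (label.toList.map (fun ch => if PySem.Chars.isalnum ch then ch else '_'))) ≠ [] :=
      pvJoin_ne_nil _ hb (fun b hbm => pvBk_blocks_ne _ [] b hbm)
    rw [if_neg (by simpa using hjoin)]

theorem pvSlugOf_eq (folio : List (String × String)) : pvSlugOfB folio = pvSlug folio := by
  unfold pvSlugOfB pvSlug
  exact pvSlug_eq_sanitize _

theorem stepB_eq (g : PySem.Dict String (List String)) (folio : List (String × String)) :
    stepB g folio = g.modify (pvSlug folio) []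
      (fun vals => if pvMan folio ∈ vals then vals else vals ++ [pvMan folio]) := by
  unfold stepB
  rw [pvSlugOf_eq]
  rfl

-- ---- the invariant relating A's state (mapping, ambiguous) to B's state (groups) ----
def pvInv (m : PySem.Dict String String) (amb : PySem.Set String)
    (g : PySem.Dict String (List String)) : Prop :=
  m.keys = g.keys ∧ g.keys.Nodup ∧
  (∀ s, m.get? s = (g.get? s).map (fun vs => vs.headD "")) ∧
  (∀ s, s ∈ amb ↔ ∃ vs, g.get? s = some vs ∧ 2 ≤ vs.length) ∧
  (∀ s vs, g.get? s = some vs → vs ≠ [])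

theorem dict_get?_modify (d : PySem.Dict String (List String)) (k k' : String)
    (f : List String → List String) :
    (d.modify k [] f).get? k' = if k' = k then some (f (d.getD k [])) else d.get? k' :=
  PySem.Dict.get?_insert d k k' _

theorem inv_step (m : PySem.Dict String String) (amb : PySem.Set String)
    (g : PySem.Dict String (List String)) (folio : List (String × String))
    (h : pvInv m amb g) :
    pvInv (stepA (m, amb) folio).1 (stepA (m, amb) folio).2 (stepB g folio) := by
  obtain ⟨hkeys, hnd, hget, hamb, hne⟩ := h
  have hgD : g.getD (pvSlug folio) [] = (g.get? (pvSlug folio)).getD [] :=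
    PySem.Dict.getD_eq_get?_getD g _ _
  cases hg : g.get? (pvSlug folio) with
  | none =>
    have hm : m.get? (pvSlug folio) = none := by rw [hget, hg]; rfl
    have hA : stepA (m, amb) folio = (m.insert (pvSlug folio) (pvMan folio), amb) := by
      simp only [stepA, hm]
    have hcg : g.contains (pvSlug folio) = false :=
      (PySem.Dict.get?_eq_none_iff_contains g _).mp hg
    have hcm : m.contains (pvSlug folio) = false :=
      (PySem.Dict.get?_eq_none_iff_contains m _).mp hm
    have hgk : (stepB g folio).keys = g.keys ++ [pvSlug folio] := by
      rw [stepB_eq, PySem.Dict.keys_modify]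
      exact PySem.Dict.keys_insert_of_not_contains g _ hcg
    have hgv : ∀ s, (stepB g folio).get? s =
        if s = pvSlug folio then some [pvMan folio] else g.get? s := by
      intro s
      rw [stepB_eq, dict_get?_modify]
      rw [hgD, hg]
      by_cases hs : s = pvSlug folio <;> simp [hs]
    have hnotk : pvSlug folio ∉ g.keys := by
      rw [PySem.Dict.contains_eq_decide_mem_keys] at hcg; simpa using hcg
    rw [hA]
    refine ⟨?_, ?_, ?_, ?_, ?_⟩
    · rw [hgk, PySem.Dict.keys_insert_of_not_contains m _ hcm, hkeys]
    · rw [hgk]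
      simp [List.nodup_append, hnd]
      intro a ha hc
      exact hnotk (hc ▸ ha)
    · intro s
      rw [PySem.Dict.get?_insert, hgv s]
      by_cases hs : s = pvSlug folio <;> simp [hs, hget s]
    · intro s
      rw [hgv s]
      by_cases hs : s = pvSlug folio
      · subst hs
        have hnotamb : pvSlug folio ∉ amb := by
          intro hsl
          obtain ⟨vs, hvs, _⟩ := (hamb _).mp hsl
          rw [hg] at hvs; cases hvs
        simp [hnotamb]
      · simp [hs, hamb s]
    · intro s vs
      rw [hgv s]
      by_cases hs : s = pvSlug folio
      · simp [hs]; rintro rfl; simp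
      · simp [hs]; exact hne s vs
  | some vs =>
    have hm : m.get? (pvSlug folio) = some (vs.headD "") := by rw [hget, hg]; simp
    have hvne : vs ≠ [] := hne _ _ hg
    have hcg : g.contains (pvSlug folio) = true := by
      rw [PySem.Dict.contains_eq_isSome_get?, hg]; rfl
    have hcm : m.contains (pvSlug folio) = true := by
      rw [PySem.Dict.contains_eq_isSome_get?, hm]; rfl
    have hgk : (stepB g folio).keys = g.keys := by
      rw [stepB_eq, PySem.Dict.keys_modify]
      exact PySem.Dict.keys_insert_of_contains g _ hcg
    have hgv : ∀ s, (stepB g folio).get? s =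
        if s = pvSlug folio
        then some (if pvMan folio ∈ vs then vs else vs ++ [pvMan folio])
        else g.get? s := by
      intro s
      rw [stepB_eq, dict_get?_modify, hgD, hg]
      rfl
    by_cases hvm : vs.headD "" = pvMan folio
    · -- same manuscript as the stored first value: A re-inserts, B leaves vs unchanged
      have hmem : pvMan folio ∈ vs := by
        cases vs with
        | nil => exact absurd rfl hvne
        | cons a t => simp at hvm; simp [← hvm]
      have hA : stepA (m, amb) folio = (m.insert (pvSlug folio) (pvMan folio), amb) := by
        simp only [stepA, hm]
        rw [if_neg (not_not_intro hvm)]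
      have hgv' : ∀ s, (stepB g folio).get? s = g.get? s := by
        intro s; rw [hgv s]
        by_cases hs : s = pvSlug folio <;> simp [hs, hmem, hg]
      rw [hA]
      refine ⟨?_, ?_, ?_, ?_, ?_⟩
      · rw [hgk, PySem.Dict.keys_insert_of_contains m _ hcm, hkeys]
      · rw [hgk]; exact hnd
      · intro s
        rw [PySem.Dict.get?_insert, hgv' s]
        by_cases hs : s = pvSlug folio
        · subst hs
          rw [if_pos rfl, hg]
          exact congrArg some hvm.symm
        · rw [if_neg hs]; exact hget s
      · intro s; rw [hgv' s]; exact hamb s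
      · intro s vs' ; rw [hgv' s]; exact hne s vs'
    · -- conflict: A marks the slug ambiguous, B's group grows to length ≥ 2
      have hA : stepA (m, amb) folio = (m, PySem.Set.add amb (pvSlug folio)) := by
        simp only [stepA, hm]
        split
        · rfl
        · next hcond => exact (hcond hvm).elim
      have hlen2 : 2 ≤ (if pvMan folio ∈ vs then vs else vs ++ [pvMan folio]).length := by
        by_cases hmv : pvMan folio ∈ vs
        · rw [if_pos hmv]
          cases vs with
          | nil => exact absurd rfl hvne
          | cons a t =>
            simp at hvm
            cases t with
            | nil => simp at hmv; exact absurd hmv.symm hvm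
            | cons b u => simp
        · rw [if_neg hmv]
          have : 1 ≤ vs.length := List.length_pos_of_ne_nil hvne
          simp; omega
      have hhead : (if pvMan folio ∈ vs then vs else vs ++ [pvMan folio]).headD "" = vs.headD "" := by
        by_cases hmv : pvMan folio ∈ vs
        · rw [if_pos hmv]
        · rw [if_neg hmv]
          cases vs with
          | nil => exact absurd rfl hvne
          | cons a t => simp
      rw [hA]
      refine ⟨?_, ?_, ?_, ?_, ?_⟩
      · rw [hgk]; exact hkeys
      · rw [hgk]; exact hnd
      · intro s
        rw [hgv s]
        by_cases hs : s = pvSlug folio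
        · subst hs
          rw [if_pos rfl, hm]
          exact congrArg some hhead.symm
        · rw [if_neg hs]; exact hget s
      · intro s
        rw [show (m, PySem.Set.add amb (pvSlug folio)).2 = PySem.Set.add amb (pvSlug folio) from rfl,
          PySem.Set.mem_add, hgv s]
        by_cases hs : s = pvSlug folio
        · subst hs
          rw [if_pos rfl]
          exact iff_of_true (Or.inr rfl) ⟨_, rfl, hlen2⟩
        · rw [if_neg hs]
          simp [hs, hamb s]
      · intro s vs'
        rw [hgv s]
        by_cases hs : s = pvSlug folio
        · rw [if_pos hs]; rintro ⟨rfl⟩ h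
          rw [h] at hlen2; simp at hlen2
        · rw [if_neg hs]; exact hne s vs'

theorem inv_foldl (fs : List (List (String × String))) :
    ∀ (m : PySem.Dict String String) (amb : PySem.Set String)
      (g : PySem.Dict String (List String)), pvInv m amb g →
    pvInv (fs.foldl stepA (m, amb)).1 (fs.foldl stepA (m, amb)).2 (fs.foldl stepB g) := by
  induction fs with
  | nil => intro m amb g h; exact h
  | cons f fs ih =>
    intro m amb g h
    simp only [List.foldl_cons]
    have := inv_step m amb g f h
    have heq : stepA (m, amb) f = ((stepA (m, amb) f).1, (stepA (m, amb) f).2) := rfl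
    rw [heq]
    exact ih _ _ _ this

theorem amb_fold_get? (L : List String) :
    ∀ (m : PySem.Dict String String) (k : String),
    (L.foldl (fun m slug => m.insert slug ("ambiguous:" ++ slug)) m).get? k =
      if k ∈ L then some ("ambiguous:" ++ k) else m.get? k := by
  induction L with
  | nil => intro m k; simp
  | cons s L ih =>
    intro m k
    simp only [List.foldl_cons, ih, List.mem_cons]
    by_cases hk : k ∈ L
    · simp [hk]
    · by_cases hks : k = s
      · subst hks; simp [hk]
      · simp [hk, hks, PySem.Dict.get?_insert]

theorem amb_fold_keys (L : List String) :
    ∀ (m : PySem.Dict String String), (∀ s ∈ L, m.contains s = true) →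
    (L.foldl (fun m slug => m.insert slug ("ambiguous:" ++ slug)) m).keys = m.keys := by
  induction L with
  | nil => intro m _; rfl
  | cons s L ih =>
    intro m hmem
    simp only [List.foldl_cons]
    rw [ih _ (fun t ht => by
      rw [PySem.Dict.contains_insert]
      simp [hmem t (List.mem_cons_of_mem _ ht)])]
    exact PySem.Dict.keys_insert_of_contains m _ (hmem s (List.mem_cons_self))

theorem final_eq (m : PySem.Dict String String) (amb : PySem.Set String)
    (g : PySem.Dict String (List String)) (h : pvInv m amb g) :
    (amb.foldl (fun m slug => m.insert slug ("ambiguous:" ++ slug)) m).items =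
      g.items.map (fun p => (p.1, if p.2.length == 1 then p.2.headD "" else "ambiguous:" ++ p.1)) := by
  obtain ⟨hkeys, hnd, hget, hamb, hne⟩ := h
  have hcont : ∀ s ∈ amb, m.contains s = true := by
    intro s hs
    obtain ⟨vs, hvs, _⟩ := (hamb s).mp hs
    rw [PySem.Dict.contains_eq_isSome_get?, hget s, hvs]; rfl
  set m' := amb.foldl (fun m slug => m.insert slug ("ambiguous:" ++ slug)) m with hm'
  have hk' : m'.keys = g.keys := by rw [hm', amb_fold_keys amb m hcont, hkeys]
  have hnd' : m'.keys.Nodup := hk' ▸ hnd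
  rw [PySem.Dict.items_eq_map_keys m' hnd' "", PySem.Dict.items_eq_map_keys g hnd [], hk',
    List.map_map]
  apply List.map_congr_left
  intro k hkmem
  obtain ⟨vs, hvs⟩ : ∃ vs, g.get? k = some vs := by
    cases hgk : g.get? k with
    | none =>
      rw [PySem.Dict.get?_eq_none_iff_contains, PySem.Dict.contains_eq_decide_mem_keys] at hgk
      simp [hkmem] at hgk
    | some vs => exact ⟨vs, rfl⟩
  have hvsne := hne k vs hvs
  have hgD : g.getD k [] = vs := by rw [PySem.Dict.getD_eq_get?_getD, hvs]; rfl
  have hm'k : m'.get? k = if k ∈ amb then some ("ambiguous:" ++ k) else m.get? k :=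
    amb_fold_get? amb m k
  simp only [Function.comp_apply, hgD, Prod.mk.injEq, true_and]
  rw [PySem.Dict.getD_eq_get?_getD, hm'k]
  by_cases h2 : 2 ≤ vs.length
  · rw [if_pos ((hamb k).mpr ⟨vs, hvs, h2⟩)]
    have hne1 : (vs.length == 1) = false := by simp; omega
    simp [hne1]
  · have h1 : vs.length = 1 := by
      have : 1 ≤ vs.length := List.length_pos_of_ne_nil hvsne
      omega
    have hnin : k ∉ amb := by
      intro hk
      obtain ⟨vs', hvs', h2'⟩ := (hamb k).mp hk
      rw [hvs] at hvs'; injection hvs' with hvv; subst hvv; omega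
    rw [if_neg hnin, hget k, hvs]
    simp [h1]

-- ===== VERDICT (by name: the statement is the Claim_ definition above) =====
theorem build_canvas_to_manuscript_py_spec : Claim_equal_build_canvas_to_manuscript_py := by
  intro sm _
  unfold Spec_build_canvas_to_manuscript_py
  unfold build_canvas_to_manuscript_py build_canvas_to_manuscript_py_alt
  have hinv : pvInv PySem.Dict.empty PySem.Set.empty PySem.Dict.empty := by
    refine ⟨rfl, List.nodup_nil, ?_, ?_, ?_⟩ <;> simp [PySem.Dict.get?_empty, PySem.Set.empty]
  have := inv_foldl ((PySem.Dict.mk sm).getD "folios" []) PySem.Dict.empty PySem.Set.empty PySem.Dict.empty hinv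
  exact final_eq _ _ _ this
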